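-- pv_equiv track=rewrite | github.com/crypto2retire/WhatShouldICharge | services/estimation_pipeline.py | _split_image_content_into_batches
-- ===== SOURCE A (Python) =====
-- def _split_image_content_into_batches(image_content: list, max_per_batch: int = 8) -> list[list]:
--     """Split interleaved text+image blocks into batches by room markers.
--
--     Room markers are text blocks starting with '\n--- ROOM:'.  Each batch gets its own
--     room context header.  If a single room has more than max_per_batch photos, it's
--     split further.
--     """
--     batches: list[list] = []
--     current: list = []
--
--     for block in image_content:
--         if not isinstance(block, dict):
--             continue
--         is_room_header = (
--             block.get("type") == "text"
--             and isinstance(block.get("text", ""), str)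
--             and block["text"].startswith("\n--- ROOM:")
--         )
--         if is_room_header and current:
--             batches.append(current)
--             current = []
--         current.append(block)
--
--     if current:
--         batches.append(current)
--
--     # Tighten batches that exceed max_per_batch photos
--     final_batches: list[list] = []
--     for batch in batches:
--         img_count = sum(1 for b in batch if isinstance(b, dict) and b.get("type") == "image")
--         if img_count <= max_per_batch:
--             final_batches.append(batch)
--         else:
--             # Split oversized batch into sub-batches
--             sub: list = []
--             sub_img = 0
--             room_header = None
--             for block in batch:
--                 is_header = (
--                     block.get("type") == "text"
--                     and isinstance(block.get("text", ""), str)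
--                     and block["text"].startswith("\n--- ROOM:")
--                 )
--                 if is_header:
--                     room_header = block
--                     sub.append(block)
--                     continue
--                 if block.get("type") == "image":
--                     if sub_img >= max_per_batch and sub:
--                         final_batches.append(list(sub))
--                         sub = [room_header] if room_header else []
--                         sub_img = 0
--                     sub_img += 1
--                 sub.append(block)
--             if sub:
--                 final_batches.append(sub)
--
--     return final_batches if final_batches else [image_content]
-- ===== SOURCE B (Python) =====
-- def _split_image_content_into_batches(image_content: list, max_per_batch: int = 8) -> list[list]:
--     """Single streaming pass: split at room markers and cap photos per batch as we go."""
--     result: list[list] = []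
--     current: list = []
--     img_count = 0
--     room_header = None
--
--     for block in image_content:
--         if not isinstance(block, dict):
--             continue
--         if (
--             block.get("type") == "text"
--             and isinstance(block.get("text", ""), str)
--             and block.get("text", "").startswith("\n--- ROOM:")
--         ):
--             if current:
--                 result.append(current)
--             current = [block]
--             room_header = block
--             img_count = 0
--         elif block.get("type") == "image":
--             if img_count >= max_per_batch and current:
--                 result.append(current)
--                 current = [room_header] if room_header else []
--                 img_count = 0
--             current.append(block)
--             img_count += 1
--         else:
--             current.append(block)
--
--     if current:
--         result.append(current)
--     return result if result else [image_content]
-- ===== Notes on version B (the rewrite author's own statement) =====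
-- stated objective: simpler
-- what changed: A's two phases (split the list at room markers, then recount photos per batch and re-split oversized batches in a second pass) are fused into one streaming pass that maintains the current batch, its photo count and the carried room header, flushing on markers and on the photo cap as it goes.
-- outside the precondition, e.g. on _split_image_content_into_batches([{'type': 'text'}], 8): A raises KeyError, B returns [[{'type': 'text'}]]
-- crash fix: A raises KeyError on inputs containing a block whose "type" is "text" but which has no "text" key (block["text"] after a .get with default); B treats such a block as ordinary text and returns the batches. — e.g. on _split_image_content_into_batches([[("type", "text")]], 8): A raises KeyError, B returns [[[("type", "text")]]]
import Mathlib
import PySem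

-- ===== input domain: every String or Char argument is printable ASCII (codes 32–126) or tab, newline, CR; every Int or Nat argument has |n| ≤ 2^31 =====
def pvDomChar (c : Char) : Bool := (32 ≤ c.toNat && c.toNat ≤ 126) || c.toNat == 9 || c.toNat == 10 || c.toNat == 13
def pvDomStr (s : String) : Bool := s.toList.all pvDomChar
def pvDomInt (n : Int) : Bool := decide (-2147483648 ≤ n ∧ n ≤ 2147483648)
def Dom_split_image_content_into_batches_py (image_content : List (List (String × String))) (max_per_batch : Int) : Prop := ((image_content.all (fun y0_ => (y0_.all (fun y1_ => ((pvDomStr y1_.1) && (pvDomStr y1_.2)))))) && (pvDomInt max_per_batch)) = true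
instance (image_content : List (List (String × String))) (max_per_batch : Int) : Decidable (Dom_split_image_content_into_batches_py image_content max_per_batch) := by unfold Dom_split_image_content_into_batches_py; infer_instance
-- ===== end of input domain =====

-- B replaces A's two phases (split by room markers, then re-split oversized batches)
-- by a single streaming pass (objective: simpler, one traversal, no per-batch recount).
-- A raises KeyError on blocks with type=="text" but no "text" key; Pre_ excludes those.

-- ===== PORT A =====
-- block.get(k): first-binding lookup in the dict literal
def pvGet (b : List (String × String)) (k : String) : Option String :=
  (PySem.Dict.mk b).get? k

-- A's is_room_header test. Python: block.get("type") == "text" and isinstance(block.get("text",""), str)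
-- (always true: all values are str) and block["text"].startswith("\n--- ROOM:"); block["text"] raises
-- KeyError when the key is absent — those inputs are excluded by Pre_, so `.getD ""` is exact on Pre_.
def pvIsRoomHeaderA (b : List (String × String)) : Bool :=
  (pvGet b "type" == some "text") && PySem.Str.startswith ((pvGet b "text").getD "") "\n--- ROOM:"

-- phase 1 loop body: state = (batches, current)
def pvStep1 (s : List (List (List (String × String))) × List (List (String × String)))
    (b : List (String × String)) :
    List (List (List (String × String))) × List (List (String × String)) :=
  if pvIsRoomHeaderA b && !s.2.isEmpty then (s.1 ++ [s.2], [b]) else (s.1, s.2 ++ [b])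

-- "if current: batches.append(current)"
def pvClose (p : List (List (List (String × String))) × List (List (String × String))) :
    List (List (List (String × String))) :=
  if p.2.isEmpty then p.1 else p.1 ++ [p.2]

-- sum(1 for b in batch if b.get("type") == "image")
def pvImgStep (n : Int) (b : List (String × String)) : Int :=
  if pvGet b "type" == some "image" then n + 1 else n

def pvImgCount (batch : List (List (String × String))) : Int :=
  batch.foldl pvImgStep 0

-- phase 2 inner loop body: state = (final_batches, sub, sub_img, room_header)
def pvStepSub (m : Int)
    (s : List (List (List (String × String))) × List (List (String × String)) × Int × Option (List (String × String)))
    (b : List (String × String)) :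
    List (List (List (String × String))) × List (List (String × String)) × Int × Option (List (String × String)) :=
  if pvIsRoomHeaderA b then (s.1, s.2.1 ++ [b], s.2.2.1, some b)
  else if pvGet b "type" == some "image" then
    if decide (m ≤ s.2.2.1) && !s.2.1.isEmpty then
      (s.1 ++ [s.2.1],
       (match s.2.2.2 with | some h => if h.isEmpty then [] else [h] | none => []) ++ [b],
       1, s.2.2.2)
    else (s.1, s.2.1 ++ [b], s.2.2.1 + 1, s.2.2.2)
  else (s.1, s.2.1 ++ [b], s.2.2.1, s.2.2.2)

-- the oversized-batch splitter (inner for-loop plus final "if sub: final_batches.append(sub)")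
def pvSplitSub (m : Int) (acc : List (List (List (String × String))))
    (batch : List (List (String × String))) : List (List (List (String × String))) :=
  let s := batch.foldl (pvStepSub m) (acc, [], 0, none)
  if s.2.1.isEmpty then s.1 else s.1 ++ [s.2.1]

def split_image_content_into_batches_py (image_content : List (List (String × String))) (max_per_batch : Int) : List (List (List (String × String))) :=
  let batches := pvClose (image_content.foldl pvStep1 ([], []))
  let final := batches.foldl
    (fun acc batch => if pvImgCount batch ≤ max_per_batch then acc ++ [batch]
                      else pvSplitSub max_per_batch acc batch) []
  if final.isEmpty then [image_content] else final

-- ===== PORT B =====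
-- B's header test uses block.get("text", "") (never raises)
def pvIsRoomHeaderB (b : List (String × String)) : Bool :=
  (pvGet b "type" == some "text") && PySem.Str.startswith ((PySem.Dict.mk b).getD "text" "") "\n--- ROOM:"

-- the single streaming loop of Source B: args = blocks, result, current, img_count, room_header
def pvLoopB (m : Int) :
    List (List (String × String)) → List (List (List (String × String))) →
    List (List (String × String)) → Int → Option (List (String × String)) →
    List (List (List (String × String)))
  | [], res, cur, _cnt, _rh => if cur.isEmpty then res else res ++ [cur]
  | b :: rest, res, cur, cnt, rh =>
    if pvIsRoomHeaderB b then
      pvLoopB m rest (if cur.isEmpty then res else res ++ [cur]) [b] 0 (some b)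
    else if pvGet b "type" == some "image" then
      if decide (m ≤ cnt) && !cur.isEmpty then
        pvLoopB m rest (res ++ [cur])
          ((match rh with | some h => if h.isEmpty then [] else [h] | none => []) ++ [b]) 1 rh
      else pvLoopB m rest res (cur ++ [b]) (cnt + 1) rh
    else pvLoopB m rest res (cur ++ [b]) cnt rh

def split_image_content_into_batches_py_alt (image_content : List (List (String × String))) (max_per_batch : Int) : List (List (List (String × String))) :=
  let res := pvLoopB max_per_batch image_content [] [] 0 none
  if res.isEmpty then [image_content] else res

-- ===== PRECONDITION & SPEC =====
-- Pre_ excludes exactly the inputs where A raises KeyError: a block whose "type" is "text" but which has no "text" key.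
def Pre_split_image_content_into_batches_py (image_content : List (List (String × String))) (max_per_batch : Int) : Prop :=
  ∀ b ∈ image_content, (PySem.Dict.mk b).get? "type" = some "text" → ((PySem.Dict.mk b).get? "text").isSome
instance (image_content : List (List (String × String))) (max_per_batch : Int) : Decidable (Pre_split_image_content_into_batches_py image_content max_per_batch) := by unfold Pre_split_image_content_into_batches_py; infer_instance

def pvWitness_split_image_content_into_batches_py : (List (List (String × String))) × Int :=
  ([[("type", "text"), ("text", "\n--- ROOM: kitchen")], [("type", "image"), ("src", "a")]], 8)

-- A raises KeyError on inputs containing a block whose "type" is "text" but which has no "text" key; B treats such a block as ordinary text and returns the batches.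
def Raises_split_image_content_into_batches_py (image_content : List (List (String × String))) (max_per_batch : Int) : Prop :=
  ∃ b ∈ image_content, (PySem.Dict.mk b).get? "type" = some "text" ∧ (PySem.Dict.mk b).get? "text" = none
instance (image_content : List (List (String × String))) (max_per_batch : Int) : Decidable (Raises_split_image_content_into_batches_py image_content max_per_batch) := by unfold Raises_split_image_content_into_batches_py; infer_instance

def pvRaiseWitness_split_image_content_into_batches_py : (List (List (String × String))) × Int :=
  ([[("type", "text")]], 8)
def pvRaiseWitnessOut_split_image_content_into_batches_py : List (List (List (String × String))) :=
  [[[("type", "text")]]]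

def Spec_split_image_content_into_batches_py (image_content : List (List (String × String))) (max_per_batch : Int) (out : List (List (List (String × String)))) : Prop := out = split_image_content_into_batches_py_alt image_content max_per_batch
instance (image_content : List (List (String × String))) (max_per_batch : Int) (out : List (List (List (String × String)))) : Decidable (Spec_split_image_content_into_batches_py image_content max_per_batch out) := by unfold Spec_split_image_content_into_batches_py; infer_instance

-- ===== CLAIM =====
def Claim_equal_split_image_content_into_batches_py : Prop := ∀ (image_content : List (List (String × String))) (max_per_batch : Int), Dom_split_image_content_into_batches_py image_content max_per_batch → Pre_split_image_content_into_batches_py image_content max_per_batch → Spec_split_image_content_into_batches_py image_content max_per_batch (split_image_content_into_batches_py image_content max_per_batch)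

def Claim_raises_split_image_content_into_batches_py : Prop := (∀ (image_content : List (List (String × String))) (max_per_batch : Int), Dom_split_image_content_into_batches_py image_content max_per_batch → Raises_split_image_content_into_batches_py image_content max_per_batch → ¬ Pre_split_image_content_into_batches_py image_content max_per_batch) ∧ (Dom_split_image_content_into_batches_py (pvRaiseWitness_split_image_content_into_batches_py.1) (pvRaiseWitness_split_image_content_into_batches_py.2) ∧ Raises_split_image_content_into_batches_py (pvRaiseWitness_split_image_content_into_batches_py.1) (pvRaiseWitness_split_image_content_into_batches_py.2) ∧ split_image_content_into_batches_py_alt (pvRaiseWitness_split_image_content_into_batches_py.1) (pvRaiseWitness_split_image_content_into_batches_py.2) = pvRaiseWitnessOut_split_image_content_into_batches_py)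

-- ===== LEMMAS AND PROOFS =====

-- the two header tests agree (get("text","") = block["text"] wherever the latter returns)
lemma pvHdrAB (b : List (String × String)) : pvIsRoomHeaderB b = pvIsRoomHeaderA b := by
  simp [pvIsRoomHeaderA, pvIsRoomHeaderB, pvGet, PySem.Dict.getD_eq_get?_getD]

lemma pvImgCount_shift (t : List (List (String × String))) : ∀ n : Int,
    List.foldl pvImgStep n t = n + List.foldl pvImgStep 0 t := by
  induction t with
  | nil => intro n; simp
  | cons b t ih =>
    intro n
    simp only [List.foldl_cons]
    rw [ih (pvImgStep n b), ih (pvImgStep 0 b)]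
    unfold pvImgStep; split_ifs <;> ring

lemma pvImgCount_cons (b : List (String × String)) (t : List (List (String × String))) :
    pvImgCount (b :: t) = (if pvGet b "type" == some "image" then 1 else 0) + pvImgCount t := by
  unfold pvImgCount
  simp only [List.foldl_cons]
  rw [pvImgCount_shift t (pvImgStep 0 b)]
  unfold pvImgStep; split_ifs <;> simp

lemma pvImgCount_nonneg (batch : List (List (String × String))) : 0 ≤ pvImgCount batch := by
  induction batch with
  | nil => simp [pvImgCount]
  | cons b t ih =>
    rw [pvImgCount_cons]
    split_ifs <;> omega

-- header blocks are not image blocks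
lemma pvHdr_not_img (b : List (String × String)) (h : pvIsRoomHeaderA b = true) :
    (pvGet b "type" == some "image") = false := by
  simp only [pvIsRoomHeaderA, Bool.and_eq_true, beq_iff_eq] at h
  simp [h.1]

-- a batch whose photo count fits the cap passes through pvSplitSub unchanged
lemma pvSplitSub_small_gen (m : Int) (batch : List (List (String × String))) :
    ∀ acc sub (cnt : Int) rh, cnt + pvImgCount batch ≤ m →
    ∃ rh', List.foldl (pvStepSub m) (acc, sub, cnt, rh) batch
      = (acc, sub ++ batch, cnt + pvImgCount batch, rh') := by
  induction batch with
  | nil => intro acc sub cnt rh _; exact ⟨rh, by simp [pvImgCount]⟩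
  | cons b t ih =>
    intro acc sub cnt rh hle
    rw [pvImgCount_cons] at hle
    have ht0 := pvImgCount_nonneg t
    simp only [List.foldl_cons]
    by_cases hhdr : pvIsRoomHeaderA b = true
    · have hni := pvHdr_not_img b hhdr
      have hcount : (if pvGet b "type" == some "image" then (1:Int) else 0) = 0 := by simp [hni]
      rw [hcount] at hle
      obtain ⟨rh', hres⟩ := ih acc (sub ++ [b]) cnt (some b) (by omega)
      refine ⟨rh', ?_⟩
      rw [show pvStepSub m (acc, sub, cnt, rh) b = (acc, sub ++ [b], cnt, some b) by
        simp [pvStepSub, hhdr]]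
      rw [hres, pvImgCount_cons]
      simp [hni]
    · by_cases himg : (pvGet b "type" == some "image") = true
      · have hcount : (if pvGet b "type" == some "image" then (1:Int) else 0) = 1 := by simp [himg]
        rw [hcount] at hle
        have hlt : ¬ (m ≤ cnt) := by omega
        obtain ⟨rh', hres⟩ := ih acc (sub ++ [b]) (cnt + 1) rh (by omega)
        refine ⟨rh', ?_⟩
        rw [show pvStepSub m (acc, sub, cnt, rh) b = (acc, sub ++ [b], cnt + 1, rh) by
          simp [pvStepSub, hhdr, himg, hlt]]
        rw [hres, pvImgCount_cons, hcount,
          show cnt + 1 + pvImgCount t = cnt + (1 + pvImgCount t) from by ring]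
        simp
      · have hcount : (if pvGet b "type" == some "image" then (1:Int) else 0) = 0 := by simp [himg]
        rw [hcount] at hle
        obtain ⟨rh', hres⟩ := ih acc (sub ++ [b]) cnt rh (by omega)
        refine ⟨rh', ?_⟩
        rw [show pvStepSub m (acc, sub, cnt, rh) b = (acc, sub ++ [b], cnt, rh) by
          simp [pvStepSub, hhdr, himg]]
        rw [hres, pvImgCount_cons, hcount]
        simp

lemma pvSplitSub_small (m : Int) (acc : List (List (List (String × String))))
    (batch : List (List (String × String))) (hne : batch ≠ [])
    (hle : pvImgCount batch ≤ m) : pvSplitSub m acc batch = acc ++ [batch] := by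
  obtain ⟨rh', hres⟩ := pvSplitSub_small_gen m batch acc [] 0 none (by omega)
  unfold pvSplitSub
  rw [hres]
  simp [hne]

-- phase 1 never records an empty batch
lemma pvPhase1_ne (l : List (List (String × String))) :
    ∀ bs cur1, (∀ x ∈ bs, x ≠ ([] : List (List (String × String)))) →
    ∀ x ∈ pvClose (List.foldl pvStep1 (bs, cur1) l), x ≠ [] := by
  induction l with
  | nil =>
    intro bs cur1 hbs x hx
    unfold pvClose at hx
    split_ifs at hx with h
    · exact hbs x hx
    · rcases List.mem_append.1 hx with h1 | h1
      · exact hbs x h1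
      · simp at h1; subst h1; simpa using h
  | cons b rest ih =>
    intro bs cur1 hbs
    simp only [List.foldl_cons]
    unfold pvStep1
    split_ifs with h
    · refine ih _ [b] ?_
      intro x hx
      rcases List.mem_append.1 hx with h1 | h1
      · exact hbs x h1
      · simp at h1; subst h1
        simp only [Bool.and_eq_true, Bool.not_eq_true'] at h
        simpa using h.2
    · exact ih bs (cur1 ++ [b]) hbs

-- on a list of nonempty batches, A's phase-2 fold is the plain pvSplitSub fold
lemma pvPhase2_eq (m : Int) (bs : List (List (List (String × String)))) :
    ∀ acc, (∀ x ∈ bs, x ≠ []) →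
    List.foldl (fun acc batch => if pvImgCount batch ≤ m then acc ++ [batch]
      else pvSplitSub m acc batch) acc bs = List.foldl (pvSplitSub m) acc bs := by
  induction bs with
  | nil => intro acc _; rfl
  | cons batch rest ih =>
    intro acc hne
    simp only [List.foldl_cons]
    have h1 : batch ≠ [] := hne batch (by simp)
    have h2 : ∀ x ∈ rest, x ≠ [] := fun x hx => hne x (by simp [hx])
    by_cases hle : pvImgCount batch ≤ m
    · rw [if_pos hle, ← pvSplitSub_small m acc batch h1 hle, ih _ h2]
    · rw [if_neg hle, ih _ h2]

-- phase 1 accumulates batches by appending on the left component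
lemma pvShift (l : List (List (String × String))) :
    ∀ bs cur1, List.foldl pvStep1 (bs, cur1) l
      = (bs ++ (List.foldl pvStep1 ([], cur1) l).1, (List.foldl pvStep1 ([], cur1) l).2) := by
  induction l with
  | nil => intro bs cur1; simp
  | cons b rest ih =>
    intro bs cur1
    simp only [List.foldl_cons]
    by_cases hg : (pvIsRoomHeaderA b && !cur1.isEmpty) = true
    · rw [show pvStep1 (bs, cur1) b = (bs ++ [cur1], [b]) by simp [pvStep1, hg],
        show pvStep1 ([], cur1) b = ([cur1], [b]) by simp [pvStep1, hg],
        ih (bs ++ [cur1]) [b], ih [cur1] [b]]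
      simp
    · rw [show pvStep1 (bs, cur1) b = (bs, cur1 ++ [b]) by simp [pvStep1, hg],
        show pvStep1 ([], cur1) b = ([], cur1 ++ [b]) by simp [pvStep1, hg]]
      exact ih bs (cur1 ++ [b])

lemma pvClose_append (x : List (List (List (String × String))))
    (p : List (List (List (String × String))) × List (List (String × String))) :
    pvClose (x ++ p.1, p.2) = x ++ pvClose p := by
  unfold pvClose; split_ifs <;> simp

-- the fusion invariant: B's streaming loop, started in the middle of splitting a phase-1
-- "current" batch, computes A's remaining pipeline
lemma pvMain (m : Int) (l : List (List (String × String))) :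
    ∀ (acc : List (List (List (String × String)))) (cur1 : List (List (String × String))),
    pvLoopB m l (List.foldl (pvStepSub m) (acc, [], 0, none) cur1).1
      (List.foldl (pvStepSub m) (acc, [], 0, none) cur1).2.1
      (List.foldl (pvStepSub m) (acc, [], 0, none) cur1).2.2.1
      (List.foldl (pvStepSub m) (acc, [], 0, none) cur1).2.2.2
    = List.foldl (pvSplitSub m) acc (pvClose (List.foldl pvStep1 ([], cur1) l)) := by
  induction l with
  | nil =>
    intro acc cur1
    cases cur1 with
    | nil => simp [pvLoopB, pvClose]
    | cons c cs =>
      rw [List.foldl_nil, show pvClose (([] : List (List (List (String × String)))), c :: cs)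
          = [c :: cs] by simp [pvClose]]
      simp [pvLoopB, pvSplitSub]
  | cons b rest ih =>
    intro acc cur1
    simp only [List.foldl_cons]
    by_cases hhdr : pvIsRoomHeaderA b = true
    · -- header block
      cases cur1 with
      | nil =>
        rw [show pvStep1 (([] : List (List (List (String × String)))), []) b = ([], [b]) by
          simp [pvStep1]]
        show pvLoopB m (b :: rest) acc [] 0 none = _
        rw [show pvLoopB m (b :: rest) acc [] 0 none = pvLoopB m rest acc [b] 0 (some b) by
          simp [pvLoopB, pvHdrAB, hhdr]]
        have := ih acc [b]
        rw [show List.foldl (pvStepSub m) (acc, [], 0, none) [b] = (acc, [b], 0, some b) by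
          simp [pvStepSub, hhdr]] at this
        exact this
      | cons c cs =>
        rw [show pvStep1 (([] : List (List (List (String × String)))), c :: cs) b
            = ([c :: cs], [b]) by simp [pvStep1, hhdr]]
        set t := List.foldl (pvStepSub m) (acc, [], 0, none) (c :: cs) with ht
        rw [show pvLoopB m (b :: rest) t.1 t.2.1 t.2.2.1 t.2.2.2
            = pvLoopB m rest (if t.2.1.isEmpty then t.1 else t.1 ++ [t.2.1]) [b] 0 (some b) by
          simp [pvLoopB, pvHdrAB, hhdr]]
        have hflush : (if t.2.1.isEmpty then t.1 else t.1 ++ [t.2.1]) = pvSplitSub m acc (c :: cs) := by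
          simp [pvSplitSub, ht]
        rw [hflush]
        have := ih (pvSplitSub m acc (c :: cs)) [b]
        rw [show List.foldl (pvStepSub m) (pvSplitSub m acc (c :: cs), [], 0, none) [b]
            = (pvSplitSub m acc (c :: cs), [b], 0, some b) by
          simp [pvStepSub, hhdr]] at this
        rw [this, pvShift rest [c :: cs] [b], pvClose_append, List.singleton_append, List.foldl_cons]
    · -- non-header block: both sides just extend the running batch
      rw [show pvStep1 ([], cur1) b = (([] : List (List (List (String × String)))), cur1 ++ [b]) by
        simp [pvStep1, hhdr]]
      set t := List.foldl (pvStepSub m) (acc, [], 0, none) cur1 with ht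
      have hstep : List.foldl (pvStepSub m) (acc, [], 0, none) (cur1 ++ [b])
          = pvStepSub m t b := by rw [List.foldl_append]; rfl
      have hB : pvLoopB m (b :: rest) t.1 t.2.1 t.2.2.1 t.2.2.2
          = pvLoopB m rest (pvStepSub m t b).1 (pvStepSub m t b).2.1
              (pvStepSub m t b).2.2.1 (pvStepSub m t b).2.2.2 := by
        simp only [pvLoopB, pvHdrAB]
        unfold pvStepSub
        rw [if_neg (by simp [hhdr])]
        split_ifs <;> rfl
      rw [hB, ← hstep]
      exact ih acc (cur1 ++ [b])

-- ===== VERDICT (by name: the statement is the Claim_ definition above) =====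
theorem split_image_content_into_batches_py_spec : Claim_equal_split_image_content_into_batches_py := by
  intro image_content max_per_batch _ _
  show split_image_content_into_batches_py image_content max_per_batch
      = split_image_content_into_batches_py_alt image_content max_per_batch
  simp only [split_image_content_into_batches_py, split_image_content_into_batches_py_alt]
  have hne := pvPhase1_ne image_content [] [] (by simp)
  rw [pvPhase2_eq max_per_batch _ _ hne]
  have hmain := pvMain max_per_batch image_content [] []
  simp only [List.foldl_nil] at hmain
  rw [hmain]

theorem split_image_content_into_batches_py_raises : Claim_raises_split_image_content_into_batches_py := by
  unfold Claim_raises_split_image_content_into_batches_py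
  constructor
  · intro l m _ ⟨b, hb, h1, h2⟩ hpre
    have := hpre b hb h1
    rw [h2] at this
    simp at this
  · refine ⟨by decide, ⟨[("type", "text")], by decide, by decide, by decide⟩, by decide⟩

-- self-check: the recorded raise witness does lie inside Raises_ (extracted from the theorem above)
theorem pvRaiseWitness_ok : Raises_split_image_content_into_batches_py
    (pvRaiseWitness_split_image_content_into_batches_py.1)
    (pvRaiseWitness_split_image_content_into_batches_py.2) :=
  split_image_content_into_batches_py_raises.2.2.1
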